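-- pv_equiv track=rewrite | github.com/tgd1975/PartsLedger | scripts/codeowner_hook.py | _glob_to_regex
-- ===== SOURCE A (Python) =====
-- def _glob_to_regex(pattern: str) -> str:
--     """Translate a gitignore-style glob into an anchored regex.
--
--     - ``**`` matches any string, including ``/``.
--     - ``*`` matches any string **not** containing ``/`` (one path segment).
--     - ``?`` matches any single character **not** ``/``.
--     - Other regex metacharacters are escaped to literal.
--
--     Note: not a full gitignore implementation — directory-only patterns
--     (``foo/``), negation (``!``), and anchoring (``/foo``) are not
--     supported. The registry is matched against repo-relative POSIX
--     paths and patterns are expected to be repo-relative too.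
--     """
--     parts: list[str] = []
--     i = 0
--     while i < len(pattern):
--         c = pattern[i]
--         if c == "*" and i + 1 < len(pattern) and pattern[i + 1] == "*":
--             parts.append(".*")
--             i += 2
--         elif c == "*":
--             parts.append("[^/]*")
--             i += 1
--         elif c == "?":
--             parts.append("[^/]")
--             i += 1
--         elif c in r".+^${}()|[]\\":
--             parts.append("\\" + c)
--             i += 1
--         else:
--             parts.append(c)
--             i += 1
--     return "^" + "".join(parts) + "$"
-- ===== SOURCE B (Python) =====
-- import re
--
-- _ESCAPE = set(r".+^${}()|[]\\")
--
-- def _glob_to_regex(pattern: str) -> str: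
--     def repl(m):
--         t = m.group(0)
--         if t == "**":
--             return ".*"
--         if t == "*":
--             return "[^/]*"
--         if t == "?":
--             return "[^/]"
--         return "\\" + t if t in _ESCAPE else t
--     return "^" + re.sub(r"\*\*|\*|\?|.", repl, pattern, flags=re.DOTALL) + "$"
-- ===== Notes on version B (the rewrite author's own statement) =====
-- stated objective: idiomatic
-- what changed: Replaces the manual index loop with a regex-driven tokenizer: re.sub with a DOTALL alternation that matches a double star, a single star, a question mark or any one character, and a replacement callback, i.e. tokenize-then-map instead of an index/accumulator loop.
import Mathlib
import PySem

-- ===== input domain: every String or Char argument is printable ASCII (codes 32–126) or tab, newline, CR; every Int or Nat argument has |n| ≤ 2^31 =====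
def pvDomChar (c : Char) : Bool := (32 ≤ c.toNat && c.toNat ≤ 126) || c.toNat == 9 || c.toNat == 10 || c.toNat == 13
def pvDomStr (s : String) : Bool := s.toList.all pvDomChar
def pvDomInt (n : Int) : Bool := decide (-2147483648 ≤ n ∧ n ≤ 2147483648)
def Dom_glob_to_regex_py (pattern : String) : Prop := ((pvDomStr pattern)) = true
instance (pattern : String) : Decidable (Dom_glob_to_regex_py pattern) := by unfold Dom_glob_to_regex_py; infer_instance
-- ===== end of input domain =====

-- B rewrites A's manual index loop as a regex-driven tokenizer (tokenize, map a
-- replacement callback over the tokens, join); same output, more idiomatic.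

-- ===== PORT A =====
-- A's while-loop over index i with its `parts` accumulator; the index loop is the
-- obvious recursion over the remaining characters, branches in A's order
-- ('**' lookahead, '*', '?', escape set, literal character).
def pvA_loop (l : List Char) (parts : List String) : List String :=
  match l with
  | [] => parts
  | c :: rest =>
    if c = '*' ∧ rest.head? = some '*' then pvA_loop rest.tail (parts ++ [".*"])
    else if c = '*' then pvA_loop rest (parts ++ ["[^/]*"])
    else if c = '?' then pvA_loop rest (parts ++ ["[^/]"])
    else if c ∈ (".+^${}()|[]\\\\").toList then pvA_loop rest (parts ++ ["\\" ++ String.ofList [c]])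
    else pvA_loop rest (parts ++ [String.ofList [c]])
termination_by l.length
decreasing_by all_goals (simp [List.length_tail]; try omega)

def glob_to_regex_py (pattern : String) : String :=
  "^" ++ String.join (pvA_loop pattern.toList []) ++ "$"

-- ===== PORT B =====
-- Source B's re.sub(r"\*\*|\*|\?|.", repl, pattern, flags=re.DOTALL): the alternation
-- scans left to right, consuming '**' if present, otherwise one character (DOTALL:
-- any character), yielding the token list that repl is mapped over.
def pvB_tokens (l : List Char) : List String :=
  match l with
  | [] => []
  | c :: rest =>
    if c = '*' ∧ rest.head? = some '*' then "**" :: pvB_tokens rest.tail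
    else String.ofList [c] :: pvB_tokens rest
termination_by l.length
decreasing_by all_goals (simp [List.length_tail]; try omega)

-- Source B's _ESCAPE = set(r".+^${}()|[]\\"): the distinct characters, as a set of
-- one-character strings so that Python's membership test `t in _ESCAPE` is exact.
def pvB_escape : List String := [".", "+", "^", "$", "{", "}", "(", ")", "|", "[", "]", "\\"]

-- Source B's repl callback, branch for branch.
def pvB_repl (t : String) : String :=
  if t = "**" then ".*"
  else if t = "*" then "[^/]*"
  else if t = "?" then "[^/]"
  else if t ∈ pvB_escape then "\\" ++ t
  else t

def glob_to_regex_py_alt (pattern : String) : String :=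
  "^" ++ String.join ((pvB_tokens pattern.toList).map pvB_repl) ++ "$"

-- ===== PRECONDITION & SPEC =====
def Spec_glob_to_regex_py (pattern : String) (out : String) : Prop := out = glob_to_regex_py_alt pattern
instance (pattern : String) (out : String) : Decidable (Spec_glob_to_regex_py pattern out) := by unfold Spec_glob_to_regex_py; infer_instance

-- ===== CLAIM (what is proved, stated in full; the proofs are below) =====
def Claim_equal_glob_to_regex_py : Prop := ∀ (pattern : String), Dom_glob_to_regex_py pattern → Spec_glob_to_regex_py pattern (glob_to_regex_py pattern)

-- ===== LEMMAS AND PROOFS =====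
-- On a single-character token that is neither '*' nor '?', repl reduces to the
-- escape-or-literal branch, and membership in _ESCAPE equals char membership.
theorem pvRepl_single (c : Char) (hs : c ≠ '*') (hq : c ≠ '?') :
    pvB_repl (String.ofList [c]) =
      if c ∈ (".+^${}()|[]\\\\").toList then "\\" ++ String.ofList [c] else String.ofList [c] := by
  have h2 : ¬ String.ofList [c] = "**" := fun h => by simpa using congrArg String.toList h
  have h3 : ¬ String.ofList [c] = "*" := fun h => hs (by simpa using congrArg String.toList h)
  have h4 : ¬ String.ofList [c] = "?" := fun h => hq (by simpa using congrArg String.toList h)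
  have h5 : (String.ofList [c] ∈ pvB_escape) ↔ (c ∈ (".+^${}()|[]\\\\").toList) := by
    simp [pvB_escape, ← String.toList_inj]
  rw [pvB_repl, if_neg h2, if_neg h3, if_neg h4]
  by_cases he : c ∈ (".+^${}()|[]\\\\").toList
  · rw [if_pos (h5.mpr he), if_pos he]
  · rw [if_neg (fun h => he (h5.mp h)), if_neg he]

-- A's loop produces exactly B's tokens with repl mapped over them.
theorem pvA_loop_eq (l : List Char) (parts : List String) :
    pvA_loop l parts = parts ++ (pvB_tokens l).map pvB_repl := by
  induction l using pvB_tokens.induct generalizing parts with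
  | case1 => simp [pvA_loop, pvB_tokens]
  | case2 c rest h ih =>
    simp only [pvA_loop, pvB_tokens, if_pos h, ih, List.map_cons]
    have : pvB_repl "**" = ".*" := by decide
    simp [this]
  | case3 c rest h ih =>
    simp only [pvA_loop, pvB_tokens, if_neg h, List.map_cons]
    by_cases hs : c = '*'
    · subst hs
      rw [if_pos rfl, ih]
      have : pvB_repl (String.ofList ['*']) = "[^/]*" := by decide
      simp [this]
    · by_cases hq : c = '?'
      · subst hq
        rw [if_neg (by decide), if_pos rfl, ih]
        have : pvB_repl (String.ofList ['?']) = "[^/]" := by decide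
        simp [this]
      · rw [if_neg hs, if_neg hq, pvRepl_single c hs hq]
        by_cases he : c ∈ (".+^${}()|[]\\\\").toList
        · rw [if_pos he, if_pos he, ih]; simp
        · rw [if_neg he, if_neg he, ih]; simp

-- ===== VERDICT (by name: the statement is the Claim_ definition above) =====
theorem glob_to_regex_py_spec : Claim_equal_glob_to_regex_py := by
  intro pattern _
  unfold Spec_glob_to_regex_py glob_to_regex_py glob_to_regex_py_alt
  rw [pvA_loop_eq]
  simp
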